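-- pv_equiv track=rewrite | github.com/Sunilsai1066/Algorithms | GFG_Solutions/Unique rows in boolean matrix.py | uniqueRow
-- ===== SOURCE A (Python) =====
-- def uniqueRow(row, col, matrix):
--     Set,Res = set(),[]
--     for i in range(0,len(matrix),col):
--         subMat = matrix[i:i+col]
--         if(tuple(subMat) not in Set):
--             Res.append(subMat)
--             Set.add(tuple(subMat))
--     return Res
-- ===== SOURCE B (Python) =====
-- def uniqueRow(row, col, matrix):
--     if col < 0:
--         return []
--     res = []
--     for i in reversed(range(0, len(matrix), col)):
--         head = matrix[i:i+col]
--         res = [head] + [r for r in res if r != head]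
--     return res
-- ===== Notes on version B (the rewrite author's own statement) =====
-- stated objective: alternative
-- what changed: B traverses the row starts back-to-front and builds the result by prepending each row and filtering out later duplicates, instead of a forward scan with an auxiliary set of seen tuples.
import Mathlib
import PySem

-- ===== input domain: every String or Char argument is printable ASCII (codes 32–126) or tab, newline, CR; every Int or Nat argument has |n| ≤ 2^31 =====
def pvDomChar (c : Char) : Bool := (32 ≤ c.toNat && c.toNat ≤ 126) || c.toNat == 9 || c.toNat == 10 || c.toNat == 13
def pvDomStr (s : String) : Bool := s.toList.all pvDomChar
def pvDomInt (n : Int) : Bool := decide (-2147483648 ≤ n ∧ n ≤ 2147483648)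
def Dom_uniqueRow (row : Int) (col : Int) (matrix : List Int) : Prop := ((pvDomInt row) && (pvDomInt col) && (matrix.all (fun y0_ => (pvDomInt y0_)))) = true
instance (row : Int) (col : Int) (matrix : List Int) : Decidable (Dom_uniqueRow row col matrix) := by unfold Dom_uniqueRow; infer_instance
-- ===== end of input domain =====

-- B builds the unique rows back-to-front by prepend-and-filter instead of a forward scan with a seen-set (alternative decomposition, same results).


-- ===== PORT A =====
def uniqueRow (row : Int) (col : Int) (matrix : List Int) : List (List Int) :=
  ((PySem.List.pyRange 0 (PySem.List.len matrix) col).foldl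
    (fun (st : PySem.Set (List Int) × List (List Int)) i =>
      let subMat := PySem.List.slice matrix (some i) (some (i + col))
      if subMat ∈ st.1 then st else (PySem.Set.add st.1 subMat, st.2 ++ [subMat]))
    (PySem.Set.empty, [])).2

-- ===== PORT B =====
def uniqueRow_alt (row : Int) (col : Int) (matrix : List Int) : List (List Int) :=
  if col < 0 then []
  else
    (PySem.List.pyRange 0 (PySem.List.len matrix) col).reverse.foldl
      (fun res i =>
        let head := PySem.List.slice matrix (some i) (some (i + col))
        head :: res.filter (fun r => decide (r ≠ head)))
      []

-- ===== PRECONDITION & SPEC =====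
-- Pre_ excludes exactly col = 0, where Python's range(0, len(matrix), 0) raises ValueError (in both A and B).
def Pre_uniqueRow (row : Int) (col : Int) (matrix : List Int) : Prop := col ≠ 0
instance (row : Int) (col : Int) (matrix : List Int) : Decidable (Pre_uniqueRow row col matrix) := by unfold Pre_uniqueRow; infer_instance
def pvWitness_uniqueRow : Int × Int × List Int := (2, 2, [1, 0, 1, 0])
def Spec_uniqueRow (row : Int) (col : Int) (matrix : List Int) (out : List (List Int)) : Prop := out = uniqueRow_alt row col matrix
instance (row : Int) (col : Int) (matrix : List Int) (out : List (List Int)) : Decidable (Spec_uniqueRow row col matrix out) := by unfold Spec_uniqueRow; infer_instance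

-- ===== CLAIM (what is proved, stated in full; the proofs are below) =====
def Claim_equal_uniqueRow : Prop := ∀ (row : Int) (col : Int) (matrix : List Int), Dom_uniqueRow row col matrix → Pre_uniqueRow row col matrix → Spec_uniqueRow row col matrix (uniqueRow row col matrix)

-- ===== LEMMAS AND PROOFS =====

-- first-occurrence dedup, defined structurally
def ddf : List (List Int) → List (List Int)
  | [] => []
  | h :: t => h :: (ddf t).filter (fun r => decide (r ≠ h))

-- B's reverse foldl is the foldr form, which is ddf of the chunks.
theorem b_foldr (f : Int → List Int) (L : List Int) :
    L.foldr (fun i res => f i :: res.filter (fun r => decide (r ≠ f i))) [] = ddf (L.map f) := by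
  induction L with
  | nil => rfl
  | cons a t ih => rw [List.map_cons, List.foldr_cons, ih]; rfl

-- A's fold with a seen-set: invariant characterisation.
theorem a_fold (cs : List (List Int)) (S : PySem.Set (List Int)) (R : List (List Int))
    (hS : ∀ x, x ∈ S ↔ x ∈ R) :
    (cs.foldl
      (fun (st : PySem.Set (List Int) × List (List Int)) c =>
        if c ∈ st.1 then st else (PySem.Set.add st.1 c, st.2 ++ [c])) (S, R)).2
    = R ++ (ddf cs).filter (fun c => decide (c ∉ R)) := by
  induction cs generalizing S R with
  | nil => simp [ddf]
  | cons c t ih =>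
    by_cases hc : c ∈ S
    · have hcR : c ∈ R := (hS c).1 hc
      simp only [List.foldl_cons, if_pos hc]
      rw [ih S R hS, ddf]
      simp only [List.filter_cons]
      rw [if_neg (by simp [hcR])]
      congr 1
      rw [List.filter_filter]
      apply List.filter_congr
      intro x _
      by_cases hx : x ∈ R
      · simp [hx]
      · have : x ≠ c := fun h => hx (h ▸ hcR)
        simp [hx, this]
    · have hcR : c ∉ R := fun h => hc ((hS c).2 h)
      simp only [List.foldl_cons, if_neg hc]
      rw [ih (PySem.Set.add S c) (R ++ [c]) (by
        intro x
        rw [PySem.Set.mem_add]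
        simp [hS x, or_comm])]
      rw [ddf]
      simp only [List.filter_cons]
      rw [if_pos (by simp [hcR])]
      simp only [List.append_assoc, List.cons_append]
      congr 2
      rw [List.filter_filter]
      apply List.filter_congr
      intro x _
      simp only [List.mem_append, List.mem_singleton]
      by_cases hx : x = c
      · simp [hx]
      · simp [hx]

-- negative step with nonnegative stop gives the empty range
theorem pyRange_neg_nil (n s : Int) (hn : 0 ≤ n) (hs : s < 0) :
    PySem.List.pyRange 0 n s = [] := by
  unfold PySem.List.pyRange
  rw [if_neg (by omega)]
  simp only [if_neg (by omega : ¬ 0 < s), if_neg (by omega : ¬ n < 0)]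
  simp

-- ===== VERDICT (by name: the statement is the Claim_ definition above) =====
theorem uniqueRow_spec : Claim_equal_uniqueRow := by
  intro row col matrix _ hpre
  unfold Spec_uniqueRow uniqueRow uniqueRow_alt
  rcases lt_trichotomy col 0 with hneg | hz | hpos
  · rw [if_pos hneg, pyRange_neg_nil _ _ (by simp [PySem.List.len]) hneg]
    rfl
  · exact absurd hz hpre
  · rw [if_neg (by omega), List.foldl_reverse]
    rw [b_foldr (fun i => PySem.List.slice matrix (some i) (some (i + col)))]
    rw [show (PySem.List.pyRange 0 (PySem.List.len matrix) col).foldl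
        (fun (st : PySem.Set (List Int) × List (List Int)) i =>
          let subMat := PySem.List.slice matrix (some i) (some (i + col))
          if subMat ∈ st.1 then st else (PySem.Set.add st.1 subMat, st.2 ++ [subMat]))
        (PySem.Set.empty, [])
      = ((PySem.List.pyRange 0 (PySem.List.len matrix) col).map
          (fun i => PySem.List.slice matrix (some i) (some (i + col)))).foldl
        (fun (st : PySem.Set (List Int) × List (List Int)) c =>
          if c ∈ st.1 then st else (PySem.Set.add st.1 c, st.2 ++ [c]))
        (PySem.Set.empty, []) from by rw [List.foldl_map]]
    rw [a_fold _ PySem.Set.empty [] (by simp [PySem.Set.empty])]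
    simp
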